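-- pv_equiv track=rewrite | github.com/whtitefall/python-scripts | job-monitor/job_monitor.py | docattributes_to_dict
-- ===== SOURCE A (Python) =====
-- from typing import Any
--
-- def docattributes_to_dict(values: Any) -> dict[str, str]:
--     output: dict[str, str] = {}
--     if not isinstance(values, list):
--         return output
--     for item in values:
--         if not isinstance(item, dict):
--             continue
--         for key, value in item.items():
--             if key not in output:
--                 output[key] = str(value)
--     return output
-- ===== SOURCE B (Python) =====
-- def docattributes_to_dict(values):
--     if not isinstance(values, list):
--         return {}
--     # pass 1 (reversed): plain overwrite-update, so the earliest dict's value
--     # ends up winning for every key -- no membership test needed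
--     winner = {}
--     for item in reversed(values):
--         if isinstance(item, dict):
--             winner.update((k, str(v)) for k, v in item.items())
--     # pass 2 (forward): key order = first occurrence (a dict comprehension
--     # keeps the first insertion position when a key repeats)
--     return {k: winner[k] for item in values if isinstance(item, dict) for k in item}
-- ===== Notes on version B (the rewrite author's own statement) =====
-- stated objective: alternative
-- what changed: B replaces A's single guarded-insertion pass by two staged passes with no membership test at all: a reversed overwrite-update pass so the earliest dict's value per key wins, then a forward dict comprehension whose overwrite-keeps-first-position semantics restores first-occurrence key order.
import Mathlib
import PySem

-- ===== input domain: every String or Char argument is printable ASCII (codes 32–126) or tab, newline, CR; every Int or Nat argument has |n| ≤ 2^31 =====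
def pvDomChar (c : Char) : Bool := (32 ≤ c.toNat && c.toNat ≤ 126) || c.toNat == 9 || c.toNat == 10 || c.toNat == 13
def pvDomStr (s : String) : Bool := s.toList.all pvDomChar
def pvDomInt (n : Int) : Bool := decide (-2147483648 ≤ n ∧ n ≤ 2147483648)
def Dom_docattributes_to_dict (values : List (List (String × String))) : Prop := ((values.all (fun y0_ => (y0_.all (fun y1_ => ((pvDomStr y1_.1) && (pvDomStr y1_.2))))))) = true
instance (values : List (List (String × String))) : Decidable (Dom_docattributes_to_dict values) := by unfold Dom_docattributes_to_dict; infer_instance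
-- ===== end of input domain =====

-- B replaces A's single guarded-insertion pass by two staged passes: a reversed
-- overwrite-update pass that leaves the earliest dict's value per key, then a forward
-- comprehension that fixes first-occurrence key order; no membership guard remains.
-- Port notes: on the typed domain (list of str->str dicts) Python's str() is the identity;
-- each input dict is modelled as its association list and Pre_ states the dict invariant
-- (no duplicate keys inside one item), which every real Python dict satisfies; winner[k]
-- in B's comprehension is ported as getD with "" (the key is always present, so the
-- default is never used).


-- ===== PORT A =====
-- A only ever adds FRESH keys ('if key not in output'), so its dict is exactly the
-- association list grown by appending; str(value) on a String is the identity.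
def aStep (out : List (String × String)) (kv : String × String) : List (String × String) :=
  if out.any (fun p => p.1 == kv.1) then out else out ++ [kv]

def docattributes_to_dict (values : List (List (String × String))) : List (String × String) :=
  values.foldl (fun out item => item.foldl aStep out) []

-- ===== PORT B =====
-- pass 1: winner.update((k, str(v)) for k, v in item.items()) — plain overwrite insert
def updStep (d : PySem.Dict String String) (kv : String × String) : PySem.Dict String String :=
  d.insert kv.1 kv.2

def winnerOf (values : List (List (String × String))) : PySem.Dict String String :=
  values.reverse.foldl (fun d item => item.foldl updStep d) PySem.Dict.empty

-- pass 2: {k: winner[k] for item in values for k in item} — overwrite keeps first position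
def docattributes_to_dict_alt (values : List (List (String × String))) : List (String × String) :=
  let winner := winnerOf values
  ((values.flatMap (fun item => item)).foldl
      (fun out kv => out.insert kv.1 (winner.getD kv.1 "")) PySem.Dict.empty).items

-- ===== PRECONDITION & SPEC =====
-- Pre_ excludes only association lists carrying a duplicate key INSIDE one item: such an
-- item is not representable as a Python dict at all (no Python input is excluded).
def Pre_docattributes_to_dict (values : List (List (String × String))) : Prop :=
  ∀ item ∈ values, (item.map Prod.fst).Nodup
instance (values : List (List (String × String))) : Decidable (Pre_docattributes_to_dict values) := by unfold Pre_docattributes_to_dict; infer_instance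

def pvWitness_docattributes_to_dict : (List (List (String × String))) :=
  [[("a", "1"), ("b", "2")], [("a", "3"), ("c", " 7 ")]]

def Spec_docattributes_to_dict (values : List (List (String × String))) (out : List (String × String)) : Prop := out = docattributes_to_dict_alt values
instance (values : List (List (String × String))) (out : List (String × String)) : Decidable (Spec_docattributes_to_dict values out) := by unfold Spec_docattributes_to_dict; infer_instance

-- ===== CLAIM (what is proved, stated in full; the proofs are below) =====
def Claim_equal_docattributes_to_dict : Prop := ∀ (values : List (List (String × String))), Dom_docattributes_to_dict values → Pre_docattributes_to_dict values → Spec_docattributes_to_dict values (docattributes_to_dict values)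

-- ===== LEMMAS AND PROOFS =====

-- a key test on an association list is membership of the key among its first components
theorem any_key_eq_mem (l : List (String × String)) (k : String) :
    (l.any (fun p => p.1 == k)) = decide (k ∈ l.map Prod.fst) := by
  induction l with
  | nil => simp
  | cons kv t ih =>
    rcases eq_or_ne kv.1 k with h | h
    · simp [h]
    · have hb : (kv.1 == k) = false := by simpa using h
      simp [hb, ih, List.mem_cons, Ne.symm h]

-- overwrite-folding a pair list into a dict: lookups see the LAST occurrence, else the old dict
theorem get?_foldl_updStep (l : List (String × String)) (d : PySem.Dict String String)
    (k : String) :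
    (l.foldl updStep d).get? k
      = ((l.reverse.find? (fun p => p.1 == k)).map Prod.snd).or (d.get? k) := by
  induction l generalizing d with
  | nil => simp
  | cons kv t ih =>
    simp only [List.foldl_cons, updStep, List.reverse_cons, List.find?_append,
      Option.map_or, Option.or_assoc, ih]
    congr 1
    rw [PySem.Dict.get?_insert]
    by_cases hk : k = kv.1
    · subst hk
      rw [List.find?_cons_of_pos (by simp), if_pos rfl]
      rfl
    · rw [List.find?_cons_of_neg (by simpa using fun h => hk h.symm), if_neg hk]
      simp

-- in a duplicate-free association list, first and last occurrence of a key coincide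
theorem find?_reverse_of_nodup (item : List (String × String)) (k : String)
    (hnd : (item.map Prod.fst).Nodup) :
    item.reverse.find? (fun p => p.1 == k) = item.find? (fun p => p.1 == k) := by
  induction item with
  | nil => rfl
  | cons kv t ih =>
    simp only [List.map_cons, List.nodup_cons] at hnd
    rw [List.reverse_cons, List.find?_append, ih hnd.2]
    by_cases hk : kv.1 = k
    · subst hk
      rw [List.find?_cons_of_pos (by simp)]
      have : t.find? (fun p => p.1 == kv.1) = none :=
        List.find?_eq_none.mpr (fun p hp h =>
          hnd.1 ((by simpa using h : p.1 = kv.1) ▸ List.mem_map_of_mem hp))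
      simp [this]
    · rw [List.find?_cons_of_neg (by simpa using hk)]
      simp [hk]

-- the reversed overwrite pass answers lookups with the FIRST occurrence across all items
theorem get?_winnerOf (values : List (List (String × String)))
    (hpre : ∀ item ∈ values, (item.map Prod.fst).Nodup) (k : String) :
    (winnerOf values).get? k
      = ((values.flatMap (fun item => item)).find? (fun p => p.1 == k)).map Prod.snd := by
  unfold winnerOf
  rw [← List.foldl_flatMap, get?_foldl_updStep]
  have hrev : (List.flatMap (fun item => item) values.reverse).reverse
      = values.flatMap (fun item => item.reverse) := by
    rw [List.reverse_flatMap, List.reverse_reverse]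
    rfl
  rw [hrev]
  have hfind : ∀ vs : List (List (String × String)),
      (∀ item ∈ vs, (item.map Prod.fst).Nodup) →
      (vs.flatMap (fun item => item.reverse)).find? (fun p => p.1 == k)
        = (vs.flatMap (fun item => item)).find? (fun p => p.1 == k) := by
    intro vs hvs
    induction vs with
    | nil => rfl
    | cons h t iht =>
      simp only [List.flatMap_cons, List.find?_append]
      rw [find?_reverse_of_nodup h k (hvs h (List.mem_cons_self)),
          iht (fun i hi => hvs i (List.mem_cons_of_mem h hi))]
  rw [hfind values hpre]
  simp

-- pass 2 in items-list form: as long as every stored value is f of its key, the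
-- overwrite insert either leaves the items untouched or appends the fresh pair
theorem items_foldl_insertF (f : String → String) (l : List (String × String))
    (d : PySem.Dict String String) (hv : ∀ p ∈ d.items, p.2 = f p.1) :
    (l.foldl (fun out kv => out.insert kv.1 (f kv.1)) d).items
      = l.foldl (fun out kv => if out.any (fun p => p.1 == kv.1) then out
                               else out ++ [(kv.1, f kv.1)]) d.items := by
  induction l generalizing d with
  | nil => rfl
  | cons kv t ih =>
    simp only [List.foldl_cons]
    have hguard : d.items.any (fun p => p.1 == kv.1) = d.contains kv.1 := by
      rw [any_key_eq_mem, PySem.Dict.contains_eq_decide_mem_keys]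
      simp only [PySem.Dict.keys]
      rfl
    by_cases hc : d.contains kv.1 = true
    · have hitems : (d.insert kv.1 (f kv.1)).items = d.items := by
        rw [PySem.Dict.items_insert, if_pos hc]
        have : ∀ p ∈ d.items,
            (if (p.1 == kv.1) = true then (kv.1, f kv.1) else p) = id p := by
          intro p hp
          by_cases hpk : (p.1 == kv.1) = true
          · have h1 : p.1 = kv.1 := by simpa using hpk
            have h2 : p.2 = f p.1 := hv p hp
            simp [id, ← h1, h2, Prod.ext_iff]
          · simp [hpk]
        rw [List.map_congr_left this, List.map_id]
      rw [hguard, if_pos hc, ih _ (by rw [hitems]; exact hv), hitems]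
    · have hitems : (d.insert kv.1 (f kv.1)).items = d.items ++ [(kv.1, f kv.1)] := by
        rw [PySem.Dict.items_insert, if_neg hc]
      rw [hguard, if_neg hc, ih _ ?_, hitems]
      intro p hp
      rw [hitems] at hp
      rcases List.mem_append.mp hp with h | h
      · exact hv p h
      · simp only [List.mem_singleton] at h
        subst h
        rfl

-- A's guarded pass equals the guarded pass that appends f(key) instead of the value,
-- provided f(key) is the first value of that key in the part of L still to be scanned
theorem foldl_guard_congr (f : String → String) (L : List (String × String)) :
    ∀ (rem : List (String × String)) (acc : List (String × String)),
    (∀ k, acc.any (fun p => p.1 == k) = false →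
        L.find? (fun p => p.1 == k) = rem.find? (fun p => p.1 == k)) →
    (∀ k, f k = ((L.find? (fun p => p.1 == k)).map Prod.snd).getD "") →
    rem.foldl aStep acc
      = rem.foldl (fun out kv => if out.any (fun p => p.1 == kv.1) then out
                                 else out ++ [(kv.1, f kv.1)]) acc := by
  intro rem
  induction rem with
  | nil => intro acc _ _; rfl
  | cons kv t ih =>
    intro acc H hf
    simp only [List.foldl_cons, aStep]
    by_cases hc : acc.any (fun p => p.1 == kv.1) = true
    · rw [if_pos hc, if_pos hc]
      refine ih acc (fun k hk => ?_) hf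
      have hne : kv.1 ≠ k := by
        intro he
        rw [he] at hc
        exact absurd hc (by simp [hk])
      rw [H k hk, List.find?_cons_of_neg (by simpa using hne)]
    · have hcf : acc.any (fun p => p.1 == kv.1) = false := Bool.eq_false_iff.mpr hc
      rw [if_neg hc, if_neg hc]
      have hval : f kv.1 = kv.2 := by
        rw [hf kv.1, H kv.1 hcf, List.find?_cons_of_pos (by simp)]
        rfl
      rw [hval]
      refine ih (acc ++ [kv]) (fun k hk => ?_) hf
      rw [List.any_append, Bool.or_eq_false_iff] at hk
      have hne : kv.1 ≠ k := by
        intro he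
        have := hk.2
        simp [he] at this
      rw [H k hk.1, List.find?_cons_of_neg (by simpa using hne)]

-- ===== VERDICT (by name: the statement is the Claim_ definition above) =====
theorem docattributes_to_dict_spec : Claim_equal_docattributes_to_dict := by
  intro values _ hpre
  show docattributes_to_dict values = docattributes_to_dict_alt values
  have hA : docattributes_to_dict values
      = (values.flatMap (fun item => item)).foldl aStep [] := by
    unfold docattributes_to_dict
    rw [← List.foldl_flatMap]
  have hguard := foldl_guard_congr (fun k => (winnerOf values).getD k "")
      (values.flatMap (fun item => item)) (values.flatMap (fun item => item)) []
      (fun _ _ => rfl)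
      (fun k => by
        show (winnerOf values).getD k "" = _
        rw [PySem.Dict.getD_eq_get?_getD, get?_winnerOf values hpre k])
  have hitems := items_foldl_insertF (fun k => (winnerOf values).getD k "")
      (values.flatMap (fun item => item)) PySem.Dict.empty (fun p hp => by cases hp)
  exact hA.trans (hguard.trans hitems.symm)
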